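-- pv_equiv track=rewrite | github.com/MahanKenway/Freedom-V2Ray | scripts/collector.py | categorize_configs
-- ===== SOURCE A (Python) =====
-- PROTOCOLS = ["vmess", "vless", "ss", "trojan", "reality"]
--
-- def categorize_configs(configs):
--     categorized = {proto: [] for proto in PROTOCOLS}
--     categorized["mix"] = []
--
--     for config in configs:
--         config = config.strip()
--         if not config: continue
--
--         categorized["mix"].append(config)
--
--         for proto in PROTOCOLS:
--             if config.startswith(f"{proto}://"):
--                 categorized[proto].append(config)
--                 break
--     return categorized
-- ===== SOURCE B (Python) =====
-- PROTOCOLS = ["vmess", "vless", "ss", "trojan", "reality"]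
--
-- def categorize_configs(configs):
--     stripped = [c for c in map(str.strip, configs) if c]
--     categorized = {p: [c for c in stripped if c.startswith(p + "://")] for p in PROTOCOLS}
--     categorized["mix"] = stripped
--     return categorized
-- ===== Notes on version B (the rewrite author's own statement) =====
-- stated objective: simpler
-- what changed: B builds each protocol bucket independently as a filter comprehension over the stripped list (relying on the five scheme prefixes being mutually exclusive), instead of A's single mutable-dict pass with an inner per-protocol scan and break.
import Mathlib
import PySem

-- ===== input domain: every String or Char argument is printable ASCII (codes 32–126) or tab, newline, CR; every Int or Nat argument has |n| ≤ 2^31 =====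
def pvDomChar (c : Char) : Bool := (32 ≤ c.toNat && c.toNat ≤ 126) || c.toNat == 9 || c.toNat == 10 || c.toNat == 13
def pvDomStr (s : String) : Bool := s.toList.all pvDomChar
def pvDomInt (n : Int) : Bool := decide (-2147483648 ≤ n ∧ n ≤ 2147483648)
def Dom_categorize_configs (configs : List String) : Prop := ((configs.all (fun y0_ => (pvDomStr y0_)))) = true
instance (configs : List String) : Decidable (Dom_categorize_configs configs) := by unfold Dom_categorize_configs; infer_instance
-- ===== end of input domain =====

-- B groups by independent per-bucket filters instead of A's mutable-dict pass with an inner break loop; objective: simpler, same cost.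

-- ===== PORT A =====
def PROTOCOLS : List String := ["vmess", "vless", "ss", "trojan", "reality"]

-- inner 'for proto in PROTOCOLS: … break' loop of A
def catInner (c : String) : List String → PySem.Dict String (List String) → PySem.Dict String (List String)
  | [], d => d
  | p :: ps, d =>
    if PySem.Str.startswith c (p ++ "://") then d.modify p [] (· ++ [c])
    else catInner c ps d

def catStep (d : PySem.Dict String (List String)) (cfg : String) : PySem.Dict String (List String) :=
  let c := PySem.Str.strip cfg
  if c == "" then d
  else catInner c PROTOCOLS (d.modify "mix" [] (· ++ [c]))

def categorize_configs (configs : List String) : List (String × List String) :=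
  let d0 := PROTOCOLS.foldl (fun d p => d.insert p []) PySem.Dict.empty
  let d1 := d0.insert "mix" []
  (configs.foldl catStep d1).items

-- ===== PORT B =====
def categorize_configs_alt (configs : List String) : List (String × List String) :=
  let stripped := (configs.map PySem.Str.strip).filter (fun c => !(c == ""))
  let d := PROTOCOLS.foldl
    (fun d p => d.insert p (stripped.filter (fun c => PySem.Str.startswith c (p ++ "://"))))
    PySem.Dict.empty
  (d.insert "mix" stripped).items

-- ===== PRECONDITION & SPEC =====
def Spec_categorize_configs (configs : List String) (out : List (String × List String)) : Prop := out = categorize_configs_alt configs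
instance (configs : List String) (out : List (String × List String)) : Decidable (Spec_categorize_configs configs out) := by unfold Spec_categorize_configs; infer_instance

-- ===== CLAIM (what is proved, stated in full; the proofs are below) =====
def Claim_equal_categorize_configs : Prop := ∀ (configs : List String), Dom_categorize_configs configs → Spec_categorize_configs configs (categorize_configs configs)

-- ===== LEMMAS AND PROOFS =====

-- the five "proto://" prefixes are pairwise incompatible, so at most one matches
lemma proto_unique (c p q : String) (hp : p ∈ PROTOCOLS) (hq : q ∈ PROTOCOLS)
    (hcp : PySem.Str.startswith c (p ++ "://") = true)
    (hcq : PySem.Str.startswith c (q ++ "://") = true) : p = q := by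
  simp only [PROTOCOLS, List.mem_cons, List.not_mem_nil, or_false] at hp hq
  rw [PySem.Str.startswith_eq, PySem.Chars.startswith_iff] at hcp hcq
  rcases hp with rfl | rfl | rfl | rfl | rfl <;>
    rcases hq with rfl | rfl | rfl | rfl | rfl <;>
      first
      | rfl
      | (exfalso
         rcases List.prefix_or_prefix_of_prefix hcp hcq with h | h <;> revert h <;> decide)

lemma getD_catInner (c k : String) (ps : List String) (d : PySem.Dict String (List String))
    (hone : ∀ p ∈ ps, ∀ q ∈ ps, PySem.Str.startswith c (p ++ "://") = true →
      PySem.Str.startswith c (q ++ "://") = true → p = q) :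
    (catInner c ps d).getD k [] =
      if k ∈ ps ∧ PySem.Str.startswith c (k ++ "://") = true
      then d.getD k [] ++ [c] else d.getD k [] := by
  induction ps generalizing d with
  | nil => simp [catInner]
  | cons p ps ih =>
    simp only [catInner]
    by_cases hsw : PySem.Str.startswith c (p ++ "://") = true
    · rw [if_pos hsw]
      by_cases hk : k = p
      · subst hk
        rw [PySem.Dict.getD_modify_self, if_pos ⟨List.mem_cons_self, hsw⟩]
      · rw [PySem.Dict.getD_modify_of_ne _ _ _ hk]
        have hfalse : ¬ (k ∈ p :: ps ∧ PySem.Str.startswith c (k ++ "://") = true) := by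
          rintro ⟨hmem, hswk⟩
          rcases List.mem_cons.mp hmem with h | h
          · exact hk h
          · exact hk (hone k (List.mem_cons_of_mem _ h) p List.mem_cons_self hswk hsw)
        rw [if_neg hfalse]
    · rw [if_neg hsw,
        ih d (fun a ha b hb => hone a (List.mem_cons_of_mem _ ha) b (List.mem_cons_of_mem _ hb))]
      by_cases hk : k = p
      · subst hk
        rw [if_neg (fun h => hsw h.2), if_neg (fun h => hsw h.2)]
      · by_cases hmem : k ∈ ps
        · simp [hmem, hk]
        · simp [hmem, hk]

lemma keys_catInner (c : String) (ps : List String) (d : PySem.Dict String (List String))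
    (h : ∀ p ∈ ps, d.contains p = true) : (catInner c ps d).keys = d.keys := by
  induction ps generalizing d with
  | nil => rfl
  | cons p ps ih =>
    simp only [catInner]
    by_cases hsw : PySem.Str.startswith c (p ++ "://") = true
    · rw [if_pos hsw, PySem.Dict.keys_modify,
        PySem.Dict.keys_insert_of_contains _ _ (h p List.mem_cons_self)]
    · rw [if_neg hsw]
      exact ih d (fun a ha => h a (List.mem_cons_of_mem _ ha))

def pvS (cs : List String) : List String :=
  (cs.map PySem.Str.strip).filter (fun c => !(c == ""))

lemma keys_catStep (d : PySem.Dict String (List String)) (cfg : String)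
    (h : d.keys = ["vmess", "vless", "ss", "trojan", "reality", "mix"]) :
    (catStep d cfg).keys = ["vmess", "vless", "ss", "trojan", "reality", "mix"] := by
  simp only [catStep]
  by_cases he : PySem.Str.strip cfg == ""
  · rw [if_pos he]; exact h
  · rw [if_neg he]
    have hmix : d.contains "mix" = true := by
      rw [PySem.Dict.contains_iff_mem_keys, h]; decide
    have hkeys' : (d.modify "mix" [] (· ++ [PySem.Str.strip cfg])).keys = d.keys := by
      rw [PySem.Dict.keys_modify, PySem.Dict.keys_insert_of_contains _ _ hmix]
    rw [keys_catInner, hkeys', h]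
    intro p hp
    rw [PySem.Dict.contains_iff_mem_keys, hkeys', h]
    simp only [PROTOCOLS, List.mem_cons, List.not_mem_nil, or_false] at hp
    rcases hp with rfl | rfl | rfl | rfl | rfl <;> decide

lemma keys_fold (cs : List String) (d : PySem.Dict String (List String))
    (h : d.keys = ["vmess", "vless", "ss", "trojan", "reality", "mix"]) :
    (cs.foldl catStep d).keys = ["vmess", "vless", "ss", "trojan", "reality", "mix"] := by
  induction cs generalizing d with
  | nil => exact h
  | cons cfg cs ih => exact ih _ (keys_catStep d cfg h)

lemma pvS_cons (cfg : String) (cs : List String) :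
    pvS (cfg :: cs) =
      if PySem.Str.strip cfg == "" then pvS cs else PySem.Str.strip cfg :: pvS cs := by
  simp only [pvS, List.map_cons, List.filter_cons]
  by_cases he : PySem.Str.strip cfg == ""
  · simp [he]
  · simp [he]

lemma getD_fold_mix (cs : List String) (d : PySem.Dict String (List String)) :
    (cs.foldl catStep d).getD "mix" [] = d.getD "mix" [] ++ pvS cs := by
  induction cs generalizing d with
  | nil => simp [pvS]
  | cons cfg cs ih =>
    rw [List.foldl_cons, ih, pvS_cons]
    simp only [catStep]
    by_cases he : PySem.Str.strip cfg == ""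
    · rw [if_pos he, if_pos he]
    · rw [if_neg he, if_neg he,
        getD_catInner _ _ _ _ (fun p hp q hq => proto_unique _ p q hp hq),
        if_neg (fun h => (by decide : ¬ (("mix" : String) ∈ PROTOCOLS)) h.1),
        PySem.Dict.getD_modify_self]
      simp [List.append_assoc]

lemma getD_fold_proto (cs : List String) (k : String) (hk : k ∈ PROTOCOLS)
    (d : PySem.Dict String (List String)) :
    (cs.foldl catStep d).getD k [] =
      d.getD k [] ++ (pvS cs).filter (fun c => PySem.Str.startswith c (k ++ "://")) := by
  have hkmix : k ≠ "mix" := by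
    simp only [PROTOCOLS, List.mem_cons, List.not_mem_nil, or_false] at hk
    rcases hk with rfl | rfl | rfl | rfl | rfl <;> decide
  induction cs generalizing d with
  | nil => simp [pvS]
  | cons cfg cs ih =>
    rw [List.foldl_cons, ih, pvS_cons]
    simp only [catStep]
    by_cases he : PySem.Str.strip cfg == ""
    · rw [if_pos he, if_pos he]
    · rw [if_neg he, if_neg he, List.filter_cons,
        getD_catInner _ _ _ _ (fun p hp q hq => proto_unique _ p q hp hq)]
      by_cases hsw : PySem.Str.startswith (PySem.Str.strip cfg) (k ++ "://") = true
      · rw [if_pos ⟨hk, hsw⟩, PySem.Dict.getD_modify_of_ne _ _ _ hkmix,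
          if_pos hsw, List.append_assoc, List.singleton_append]
      · rw [if_neg (fun h => hsw h.2), PySem.Dict.getD_modify_of_ne _ _ _ hkmix,
          if_neg hsw]


def pvD1 : PySem.Dict String (List String) :=
  (PROTOCOLS.foldl (fun d p => d.insert p []) PySem.Dict.empty).insert "mix" []

lemma alt_eq (configs : List String) :
    categorize_configs_alt configs =
      [("vmess", (pvS configs).filter (fun c => PySem.Str.startswith c ("vmess" ++ "://"))),
       ("vless", (pvS configs).filter (fun c => PySem.Str.startswith c ("vless" ++ "://"))),
       ("ss", (pvS configs).filter (fun c => PySem.Str.startswith c ("ss" ++ "://"))),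
       ("trojan", (pvS configs).filter (fun c => PySem.Str.startswith c ("trojan" ++ "://"))),
       ("reality", (pvS configs).filter (fun c => PySem.Str.startswith c ("reality" ++ "://"))),
       ("mix", pvS configs)] := rfl

-- ===== VERDICT (by name: the statement is the Claim_ definition above) =====
theorem categorize_configs_spec : Claim_equal_categorize_configs := by
  intro configs _
  show categorize_configs configs = categorize_configs_alt configs
  rw [alt_eq]
  have hA : categorize_configs configs = (configs.foldl catStep pvD1).items := rfl
  have hkeys := keys_fold configs pvD1 (by decide)
  have hnd : (configs.foldl catStep pvD1).keys.Nodup := by rw [hkeys]; decide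
  rw [hA, PySem.Dict.items_eq_map_keys _ hnd [], hkeys]
  simp only [List.map_cons, List.map_nil]
  rw [getD_fold_proto configs "vmess" (by decide) pvD1,
      getD_fold_proto configs "vless" (by decide) pvD1,
      getD_fold_proto configs "ss" (by decide) pvD1,
      getD_fold_proto configs "trojan" (by decide) pvD1,
      getD_fold_proto configs "reality" (by decide) pvD1,
      getD_fold_mix configs pvD1]
  rfl
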